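-- pv_equiv track=rewrite | github.com/geekieo/collaborative-deep-metric-learning | parse_data.py | filter_watched_guids
-- ===== SOURCE A (Python) =====
-- def filter_watched_guids(all_watched_guids, no_feature_guids):
--   """ Filter all_watched_guids by no_feature_guids.
--   删除 all_watched_guids 中访问不到 feature 的 guid，
--   并以此 guid 为分割点，将这一条 watched_guids 分成两条。
--   用于生成可成功获取 feature 的 cowatch。
--   """
--   no_feature_guids = set(no_feature_guids)
--   filtered_watched_guids=[]
--   for watched_guids in all_watched_guids:
--     # 切分出的列表的头元素在原列表的索引
--     head = 0
--     for i,guid in enumerate(watched_guids):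
--       if guid in no_feature_guids:
--         # 忽略长度小于2的列表，无法生成 cowatch
--         if len(watched_guids[head:i]) > 1:
--           filtered_watched_guids.append(watched_guids[head:i])
--         head = i+1
--     # 忽略长度小于2的列表，无法生成 cowatch
--     if len(watched_guids[head:]) > 1:
--       filtered_watched_guids.append(watched_guids[head:])
--   return filtered_watched_guids
-- ===== SOURCE B (Python) =====
-- def _segments(watched_guids, no_feature_set):
--   """Maximal runs of consecutive guids that are not in no_feature_set."""
--   segs = []
--   cur = []
--   for guid in watched_guids:
--     if guid in no_feature_set:
--       if cur:
--         segs.append(cur)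
--       cur = []
--     else:
--       cur.append(guid)
--   if cur:
--     segs.append(cur)
--   return segs
--
-- def filter_watched_guids(all_watched_guids, no_feature_guids):
--   no_feature_set = set(no_feature_guids)
--   return [seg
--           for watched_guids in all_watched_guids
--           for seg in _segments(watched_guids, no_feature_set)
--           if len(seg) > 1]
-- ===== Notes on version B (the rewrite author's own statement) =====
-- stated objective: simpler
-- what changed: B separates concerns: a helper builds each sequence's maximal runs of featured guids by accumulating segment lists directly (no head index, no enumerate, no slicing), and a single comprehension flattens the runs and keeps those longer than 1, replacing A's interleaved index/slice bookkeeping.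
import Mathlib
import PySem

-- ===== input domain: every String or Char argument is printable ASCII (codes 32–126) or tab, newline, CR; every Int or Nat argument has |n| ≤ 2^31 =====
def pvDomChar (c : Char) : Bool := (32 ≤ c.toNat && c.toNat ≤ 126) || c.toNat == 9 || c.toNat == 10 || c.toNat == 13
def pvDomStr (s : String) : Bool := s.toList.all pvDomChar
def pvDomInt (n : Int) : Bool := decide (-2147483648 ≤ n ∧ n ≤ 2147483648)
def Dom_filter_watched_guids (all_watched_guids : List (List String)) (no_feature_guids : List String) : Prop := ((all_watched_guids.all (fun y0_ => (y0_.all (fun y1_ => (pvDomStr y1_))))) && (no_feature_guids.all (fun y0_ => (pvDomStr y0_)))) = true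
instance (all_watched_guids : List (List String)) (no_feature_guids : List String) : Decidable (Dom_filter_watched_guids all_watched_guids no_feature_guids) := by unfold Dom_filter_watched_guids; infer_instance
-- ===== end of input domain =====

-- B replaces A's head-index/slice bookkeeping with a run-building helper plus one
-- filtering comprehension (objective: simpler); same cost, same return value.

-- ===== PORT A =====
-- inner 'for i, guid in enumerate(watched_guids)' loop; state = (head, filtered_watched_guids)
def pvA_inner (nf : PySem.Set String) (ws : List String) :
    List (Int × String) → Int → List (List String) → Int × List (List String)
  | [], head, acc => (head, acc)
  | (i, guid) :: rest, head, acc =>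
    if PySem.Set.contains nf guid then
      let acc' := if (PySem.List.slice ws (some head) (some i)).length > 1
        then acc ++ [PySem.List.slice ws (some head) (some i)] else acc
      pvA_inner nf ws rest (i + 1) acc'
    else
      pvA_inner nf ws rest head acc

-- A's trailing 'if len(watched_guids[head:]) > 1: …append…' on the inner loop's final state
def pvA_finish (ws : List String) (p : Int × List (List String)) : List (List String) :=
  if (PySem.List.slice ws (some p.1) none).length > 1
    then p.2 ++ [PySem.List.slice ws (some p.1) none] else p.2

-- body of the outer 'for watched_guids in all_watched_guids' loop
def pvA_body (nf : PySem.Set String) (acc : List (List String)) (ws : List String) : List (List String) :=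
  pvA_finish ws (pvA_inner nf ws (PySem.List.enumerate ws 0) 0 acc)

def filter_watched_guids (all_watched_guids : List (List String)) (no_feature_guids : List String) : List (List String) :=
  let nf := PySem.Set.ofList no_feature_guids
  all_watched_guids.foldl (pvA_body nf) []

-- ===== PORT B =====
-- one step of _segments' loop; state = (segs, cur)
def pvB_step (nf : PySem.Set String) (p : List (List String) × List String) (guid : String) :
    List (List String) × List String :=
  if PySem.Set.contains nf guid then
    (if p.2.isEmpty then p.1 else p.1 ++ [p.2], [])
  else
    (p.1, p.2 ++ [guid])

-- the trailing 'if cur: segs.append(cur)'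
def pvB_finish (p : List (List String) × List String) : List (List String) :=
  if p.2.isEmpty then p.1 else p.1 ++ [p.2]

-- _segments(watched_guids, no_feature_set)
def pvSegments (nf : PySem.Set String) (ws : List String) : List (List String) :=
  pvB_finish (ws.foldl (pvB_step nf) ([], []))

def filter_watched_guids_alt (all_watched_guids : List (List String)) (no_feature_guids : List String) : List (List String) :=
  let nf := PySem.Set.ofList no_feature_guids
  all_watched_guids.flatMap (fun ws => (pvSegments nf ws).filter (fun seg => decide (seg.length > 1)))

-- ===== PRECONDITION & SPEC =====
def Spec_filter_watched_guids (all_watched_guids : List (List String)) (no_feature_guids : List String) (out : List (List String)) : Prop := out = filter_watched_guids_alt all_watched_guids no_feature_guids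
instance (all_watched_guids : List (List String)) (no_feature_guids : List String) (out : List (List String)) : Decidable (Spec_filter_watched_guids all_watched_guids no_feature_guids out) := by unfold Spec_filter_watched_guids; infer_instance

-- ===== CLAIM (what is proved, stated in full; the proofs are below) =====
def Claim_equal_filter_watched_guids : Prop := ∀ (all_watched_guids : List (List String)) (no_feature_guids : List String), Dom_filter_watched_guids all_watched_guids no_feature_guids → Spec_filter_watched_guids all_watched_guids no_feature_guids (filter_watched_guids all_watched_guids no_feature_guids)

-- ===== LEMMAS AND PROOFS =====

-- proof-side recursive description of the segments B still produces from `rest` given current run `cur`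
def pvSegLoop (nf : PySem.Set String) : List String → List String → List (List String)
  | [], cur => if cur.isEmpty then [] else [cur]
  | g :: t, cur =>
    if PySem.Set.contains nf g then
      (if cur.isEmpty then [] else [cur]) ++ pvSegLoop nf t []
    else
      pvSegLoop nf t (cur ++ [g])

lemma pvSegments_foldl (nf : PySem.Set String) :
    ∀ (rest cur : List String) (segs : List (List String)),
    pvB_finish (rest.foldl (pvB_step nf) (segs, cur)) = segs ++ pvSegLoop nf rest cur := by
  intro rest
  induction rest with
  | nil => intro cur segs; simp only [List.foldl_nil, pvB_finish, pvSegLoop]; split <;> simp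
  | cons g t ih =>
    intro cur segs
    simp only [List.foldl_cons, pvSegLoop, pvB_step]
    by_cases h : PySem.Set.contains nf g = true
    · simp only [h, if_pos]
      rw [ih [] _]
      split <;> simp
    · simp only [h, Bool.false_eq_true, not_false_iff, if_neg]
      rw [ih (cur ++ [g]) segs]

lemma pvSegments_eq (nf : PySem.Set String) (ws : List String) :
    pvSegments nf ws = pvSegLoop nf ws [] := by
  unfold pvSegments
  simpa using pvSegments_foldl nf ws [] []

-- key per-sequence invariant: A's inner loop + tail check over the suffix `rest`
-- (head = pre.length, current run = cur) yields B's filtered remaining segments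
lemma pvA_inner_eq (nf : PySem.Set String) :
    ∀ (rest pre cur : List String) (acc : List (List String)),
    pvA_finish (pre ++ cur ++ rest)
        (pvA_inner nf (pre ++ cur ++ rest)
          (PySem.List.enumerate rest ((pre.length + cur.length : Nat) : Int))
          ((pre.length : Nat) : Int) acc)
    = acc ++ (pvSegLoop nf rest cur).filter (fun seg => decide (seg.length > 1)) := by
  intro rest
  induction rest with
  | nil =>
    intro pre cur acc
    simp only [PySem.List.enumerate_nil, pvA_inner, pvSegLoop, pvA_finish]
    rw [PySem.List.slice_from_natCast, List.append_nil, List.drop_left]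
    by_cases h : cur.isEmpty
    · simp_all
    · simp only [h, Bool.false_eq_true, not_false_iff, if_neg, List.filter]
      by_cases h2 : cur.length > 1 <;> simp [h2]
  | cons g t ih =>
    intro pre cur acc
    rw [PySem.List.enumerate_cons]
    simp only [pvA_inner, pvSegLoop]
    by_cases h : PySem.Set.contains nf g = true
    · simp only [h, if_pos]
      have hsl : PySem.List.slice (pre ++ cur ++ g :: t) (some ((pre.length : Nat) : Int))
          (some ((pre.length + cur.length : Nat) : Int)) = cur := by
        rw [PySem.List.slice_natCast]
        rw [List.append_assoc, List.drop_left]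
        simp [List.take_left']
      rw [hsl]
      have ihx := ih (pre ++ cur ++ [g]) [] (if cur.length > 1 then acc ++ [cur] else acc)
      simp only [List.append_nil, List.length_nil, Nat.add_zero, List.append_assoc,
        List.singleton_append, List.length_append, List.length_cons] at ihx ⊢
      push_cast at ihx ⊢
      have e : (pre.length : Int) + ((cur.length : Int) + 1) = (pre.length : Int) + (cur.length : Int) + 1 := by ring
      rw [e] at ihx
      rw [ihx]
      by_cases h2 : cur.isEmpty
      · have h3 : ¬ cur.length > 1 := by rw [List.isEmpty_iff] at h2; simp [h2]
        simp [h2, h3]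
      · simp only [h2, Bool.false_eq_true, not_false_iff, if_neg, List.filter_append, List.filter]
        by_cases h3 : cur.length > 1 <;> simp [h3, List.append_assoc]
    · simp only [h, Bool.false_eq_true, not_false_iff, if_neg]
      have ihx := ih pre (cur ++ [g]) acc
      simp only [List.append_assoc, List.singleton_append, List.length_append,
        List.length_cons] at ihx ⊢
      push_cast at ihx ⊢
      simp only [List.length_nil, Nat.cast_zero, zero_add] at ihx
      have e : (pre.length : Int) + ((cur.length : Int) + 1) = (pre.length : Int) + (cur.length : Int) + 1 := by ring
      rw [e] at ihx
      rw [ihx]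

lemma pvA_body_eq (nf : PySem.Set String) (ws : List String) (acc : List (List String)) :
    pvA_body nf acc ws = acc ++ (pvSegments nf ws).filter (fun seg => decide (seg.length > 1)) := by
  rw [pvSegments_eq]
  have h := pvA_inner_eq nf ws [] [] acc
  simpa [pvA_body] using h

-- ===== VERDICT (by name: the statement is the Claim_ definition above) =====
theorem filter_watched_guids_spec : Claim_equal_filter_watched_guids := by
  intro all_watched_guids no_feature_guids _
  unfold Spec_filter_watched_guids filter_watched_guids filter_watched_guids_alt
  simp only
  have main : ∀ (l : List (List String)) (acc : List (List String)),
      l.foldl (pvA_body (PySem.Set.ofList no_feature_guids)) acc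
      = acc ++ l.flatMap (fun ws => (pvSegments (PySem.Set.ofList no_feature_guids) ws).filter
          (fun seg => decide (seg.length > 1))) := by
    intro l
    induction l with
    | nil => intro acc; simp
    | cons x t iht =>
      intro acc
      simp only [List.foldl_cons, List.flatMap_cons]
      rw [pvA_body_eq, iht]
      simp [List.append_assoc]
  simpa using main all_watched_guids []
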